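-- pv_equiv track=rewrite | github.com/ssebastianj/taip-2014 | win_like_score_flirt/solution.py | calc_gallantry_count
-- ===== SOURCE A (Python) =====
-- import itertools
--
-- def calc_gallantry_count(players):
--     turns_yielded = turns_count = len(players) // 2
--     turns_combinations = itertools.combinations_with_replacement([0, 1], 3)
--     players = sorted(players)
--
--     for turns in turns_combinations:
--         players_list = players[:]
--         german = giannina = 0
--
--         for turn in turns:
--             max_player = players_list.pop()
--
--             if turn:
--                 giannina += max_player
--             else:
--                 german += max_player
--
--         giannina += sum(players_list)
--         turns_yielded -= 1 if german > giannina else 0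
--
--     return -1 if (turns_yielded == turns_count) else turns_yielded
-- ===== SOURCE B (Python) =====
-- import itertools
--
--
-- def calc_gallantry_count(players):
--     # Reformulation: giannina = total - german, so german wins a combination
--     # iff 2 * german > total.  German's possible shares are exactly the four
--     # prefix sums (0, a, a+b, a+b+c) of the three largest players.
--     turns_count = len(players) // 2
--     total = sum(players)
--     s = sorted(players, reverse=True)
--     shares = [0] + list(itertools.accumulate((s[0], s[1], s[2])))
--     wins = sum(1 for german in shares if 2 * german > total)
--     return -1 if wins == 0 else turns_count - wins
-- ===== Notes on version B (the rewrite author's own statement) =====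
-- stated objective: simpler
-- what changed: Instead of simulating the four turn combinations with list copies, pops and both players' running totals, B reformulates the win test as 2*german > total (eliminating giannina entirely) and counts, over the four prefix sums of the three largest players, how many exceed half the total.
import Mathlib
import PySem

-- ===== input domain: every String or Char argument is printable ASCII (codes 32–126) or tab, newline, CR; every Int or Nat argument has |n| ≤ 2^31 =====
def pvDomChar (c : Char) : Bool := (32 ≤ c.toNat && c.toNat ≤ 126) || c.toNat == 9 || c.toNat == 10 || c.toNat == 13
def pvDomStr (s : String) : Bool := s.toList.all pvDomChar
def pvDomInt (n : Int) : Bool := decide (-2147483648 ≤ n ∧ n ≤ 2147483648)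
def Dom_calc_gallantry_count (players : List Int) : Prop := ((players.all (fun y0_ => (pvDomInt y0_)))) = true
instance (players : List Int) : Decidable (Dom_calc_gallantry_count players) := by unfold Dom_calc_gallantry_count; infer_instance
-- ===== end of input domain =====

-- B drops the simulation of the four turn combinations (list copies, pops, both players'
-- totals) and instead counts how many of German's four possible shares — the prefix sums
-- of the three largest players — exceed half the grand total (objective: simpler).

-- ===== PORT A =====
-- one inner-loop step: pop the last element and add it to german or giannina
def pvTurnStep (st : Int × Int × List Int) (turn : Int) : Int × Int × List Int :=
  match PySem.List.pop? st.2.2 (-1) with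
  | some (max_player, rest) =>
      if turn ≠ 0 then (st.1, st.2.1 + max_player, rest)
      else (st.1 + max_player, st.2.1, rest)
  | none => st    -- pop() on an empty list raises IndexError: excluded by Pre_

def calc_gallantry_count (players : List Int) : Int :=
  let turns_count := PySem.Int.floordiv (players.length : Int) 2
  let sortedPlayers := PySem.List.sorted players (fun x => x) false
  let turns_yielded :=
    [[(0:Int),0,0],[0,0,1],[0,1,1],[1,1,1]].foldl (fun ty turns =>
      let st := turns.foldl pvTurnStep (0, 0, sortedPlayers)
      let german := st.1
      let giannina := st.2.1 + st.2.2.sum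
      ty - (if german > giannina then 1 else 0)) turns_count
  if turns_yielded = turns_count then -1 else turns_yielded

-- ===== PORT B =====
-- itertools.accumulate: running sums of a list
def pvAccumulate (xs : List Int) : List Int :=
  (xs.foldl (fun (st : List Int × Int) x => (st.1 ++ [st.2 + x], st.2 + x)) ([], 0)).1

def calc_gallantry_count_alt (players : List Int) : Int :=
  let turns_count := PySem.Int.floordiv (players.length : Int) 2
  let total := players.sum
  let s := PySem.List.sorted players (fun x => x) true
  let s0 := (PySem.List.pyGet? s 0).getD 0   -- s[0]; Pre_ keeps the indices in range
  let s1 := (PySem.List.pyGet? s 1).getD 0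
  let s2 := (PySem.List.pyGet? s 2).getD 0
  let shares := [(0:Int)] ++ pvAccumulate [s0, s1, s2]
  let wins := shares.foldl (fun w german => w + (if 2 * german > total then 1 else 0)) 0
  if wins = 0 then -1 else turns_count - wins

-- ===== PRECONDITION & SPEC =====
-- Python A pops three elements from the list, so it raises IndexError when len(players) < 3.
def Pre_calc_gallantry_count (players : List Int) : Prop := 3 ≤ players.length
instance (players : List Int) : Decidable (Pre_calc_gallantry_count players) := by unfold Pre_calc_gallantry_count; infer_instance
def pvWitness_calc_gallantry_count : List Int := [2, 7, 1, 5]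

def Spec_calc_gallantry_count (players : List Int) (out : Int) : Prop := out = calc_gallantry_count_alt players
instance (players : List Int) (out : Int) : Decidable (Spec_calc_gallantry_count players out) := by unfold Spec_calc_gallantry_count; infer_instance

-- ===== CLAIM (what is proved, stated in full; the proofs are below) =====
def Claim_equal_calc_gallantry_count : Prop := ∀ (players : List Int), Dom_calc_gallantry_count players → Pre_calc_gallantry_count players → Spec_calc_gallantry_count players (calc_gallantry_count players)

-- ===== LEMMAS AND PROOFS =====

-- reverse=True sort of ints equals the reverse of the ascending sort
lemma sorted_rev_eq_reverse (xs : List Int) :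
    PySem.List.sorted xs (fun x => x) true = (PySem.List.sorted xs (fun x => x) false).reverse := by
  have hperm : (PySem.List.sorted xs (fun x => x) true).Perm
      ((PySem.List.sorted xs (fun x => x) false).reverse) :=
    (PySem.List.sorted_perm xs (fun x => x) true).trans
      ((PySem.List.sorted_perm xs (fun x => x) false).symm.trans
        (List.reverse_perm _).symm)
  exact List.Perm.eq_of_pairwise (le := fun a b : Int => b ≤ a)
    (fun a b _ _ h1 h2 => le_antisymm h2 h1)
    (PySem.List.sorted_pairwise_rev xs (fun x => x))
    ((List.pairwise_reverse.mpr)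
      (by simpa using PySem.List.sorted_pairwise xs (fun x => x)))
    hperm

-- a list of length ≥ 3 splits off its last three elements
lemma split_last_three (s : List Int) (h : 3 ≤ s.length) :
    ∃ t a b c, s = t ++ [c, b, a] := by
  rcases hrev : s.reverse with _ | ⟨a, _ | ⟨b, _ | ⟨c, t⟩⟩⟩
  · have := congrArg List.length hrev
    simp only [List.length_reverse, List.length_nil] at this; omega
  · have := congrArg List.length hrev
    simp only [List.length_reverse, List.length_cons, List.length_nil] at this; omega
  · have := congrArg List.length hrev
    simp only [List.length_reverse, List.length_cons, List.length_nil] at this; omega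
  · refine ⟨t.reverse, a, b, c, ?_⟩
    rw [← s.reverse_reverse, hrev]; simp

set_option maxHeartbeats 2000000 in
theorem calc_gallantry_count_spec_aux (players : List Int)
    (h : Pre_calc_gallantry_count players) :
    calc_gallantry_count players = calc_gallantry_count_alt players := by
  unfold Pre_calc_gallantry_count at h
  obtain ⟨t, a, b, c, hs⟩ := split_last_three (PySem.List.sorted players (fun x => x) false)
    (by rw [PySem.List.length_sorted]; omega)
  have hrev : PySem.List.sorted players (fun x => x) true = a :: b :: c :: t.reverse := by
    rw [sorted_rev_eq_reverse, hs]; simp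
  have hsum : players.sum = t.sum + (c + b + a) := by
    have := (PySem.List.sorted_perm players (fun x => x) false).sum_eq
    rw [hs] at this; simp at this; omega
  unfold calc_gallantry_count calc_gallantry_count_alt
  rw [hs, hrev, hsum]
  have hpop1 : PySem.List.pop? (t ++ [c, b, a]) (-1) = some (a, t ++ [c, b]) := by
    simpa using PySem.List.pop?_last (t ++ [c, b]) a
  have hpop2 : PySem.List.pop? (t ++ [c, b]) (-1) = some (b, t ++ [c]) := by
    simpa using PySem.List.pop?_last (t ++ [c]) b
  have hpop3 : PySem.List.pop? (t ++ [c]) (-1) = some (c, t) := by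
    simpa using PySem.List.pop?_last t c
  have h0 : (0:Int) ≤ (t.length : Int) + 1 + 1 := by omega
  have h1 : (0:Int) ≤ (t.length : Int) + 1 := by omega
  have h2 : (2:Int) ≤ (t.length : Int) + 1 + 1 := by omega
  have hg0 : PySem.List.pyGet? (a :: b :: c :: t.reverse) 0 = some a := by
    simp [PySem.List.pyGet?, PySem.List.pyIdx?, h0]
  have hg1 : PySem.List.pyGet? (a :: b :: c :: t.reverse) 1 = some b := by
    simp [PySem.List.pyGet?, PySem.List.pyIdx?, h1]
  have hg2 : PySem.List.pyGet? (a :: b :: c :: t.reverse) 2 = some c := by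
    simp [PySem.List.pyGet?, PySem.List.pyIdx?, h2]
  simp [pvTurnStep, hpop1, hpop2, hpop3, pvAccumulate, hg0, hg1, hg2]
  split_ifs <;> omega

-- ===== VERDICT (by name: the statement is the Claim_ definition above) =====
theorem calc_gallantry_count_spec : Claim_equal_calc_gallantry_count := by
  intro players _ hpre
  unfold Spec_calc_gallantry_count
  exact calc_gallantry_count_spec_aux players hpre
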